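-- pv_equiv track=rewrite | github.com/KarimElbarbary99/Symbolic-AI-and-Logic-Based-Systems-project- | Solve Nonograms/approach1_hex.py | hexagonal_board_generator_orientation3
-- ===== SOURCE A (Python) =====
-- def hexagonal_board_generator_orientation3(size):
--     # Create a list to hold the rows of coordinates
--     hex_rows = []
--
--     # Generate the grid starting from (2,0)
--     for x in range(size - 1, -size, -1):
--         row = []
--         for y in range(size - 1, -size, -1):
--             # Skip the coordinates that would not form a hexagon
--             if abs(x + y) < size:
--                 row.append((x, y))
--         if row:
--             hex_rows.append(row)
--
--     return hex_rows
-- ===== SOURCE B (Python) =====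
-- def hexagonal_board_generator_orientation3(size):
--     # Closed-form y interval from -size < x+y < size: no abs() test inside the row.
--     return [[(x, y) for y in range(min(size - 1, size - 1 - x),
--                                    max(-size, -size - x), -1)]
--             for x in range(size - 1, -size, -1)]
-- ===== Notes on version B (the rewrite author's own statement) =====
-- stated objective: simpler
-- what changed: B computes each row's valid y interval in closed form from the hexagon condition and emits the descending range directly, instead of scanning the full y range and filtering with an abs() test; the non-empty-row guard disappears because every generated row is provably non-empty.
import Mathlib
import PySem

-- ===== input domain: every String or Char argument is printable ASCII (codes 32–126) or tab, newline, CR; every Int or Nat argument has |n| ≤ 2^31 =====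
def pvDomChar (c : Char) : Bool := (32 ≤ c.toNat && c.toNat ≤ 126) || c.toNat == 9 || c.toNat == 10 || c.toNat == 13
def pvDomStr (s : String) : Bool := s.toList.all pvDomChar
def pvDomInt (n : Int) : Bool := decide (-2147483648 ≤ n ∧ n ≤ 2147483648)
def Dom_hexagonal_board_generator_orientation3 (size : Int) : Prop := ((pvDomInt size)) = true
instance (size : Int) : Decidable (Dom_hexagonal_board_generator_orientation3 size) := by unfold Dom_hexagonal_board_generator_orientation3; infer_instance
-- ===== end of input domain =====

-- B replaces A's scan-all-then-filter inner loop by a directly computed descending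
-- y-range with closed-form endpoints (objective: simpler; same asymptotic cost).

-- ===== PORT A =====
def hexagonal_board_generator_orientation3 (size : Int) : List (List (Int × Int)) :=
  (PySem.List.pyRange (size - 1) (-size) (-1)).foldl (fun hex_rows x =>
    let row := (PySem.List.pyRange (size - 1) (-size) (-1)).foldl (fun row y =>
      if |x + y| < size then row ++ [(x, y)] else row) []
    if row ≠ [] then hex_rows ++ [row] else hex_rows) []

-- ===== PORT B =====
def hexagonal_board_generator_orientation3_alt (size : Int) : List (List (Int × Int)) :=
  (PySem.List.pyRange (size - 1) (-size) (-1)).map (fun x =>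
    (PySem.List.pyRange (min (size - 1) (size - 1 - x)) (max (-size) (-size - x)) (-1)).map
      (fun y => (x, y)))

-- ===== PRECONDITION & SPEC =====
def Spec_hexagonal_board_generator_orientation3 (size : Int) (out : List (List (Int × Int))) : Prop := out = hexagonal_board_generator_orientation3_alt size
instance (size : Int) (out : List (List (Int × Int))) : Decidable (Spec_hexagonal_board_generator_orientation3 size out) := by unfold Spec_hexagonal_board_generator_orientation3; infer_instance

-- ===== CLAIM (what is proved, stated in full; the proofs are below) =====
def Claim_equal_hexagonal_board_generator_orientation3 : Prop := ∀ (size : Int), Dom_hexagonal_board_generator_orientation3 size → Spec_hexagonal_board_generator_orientation3 size (hexagonal_board_generator_orientation3 size)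

-- ===== LEMMAS AND PROOFS =====

-- Filtering a descending range by |x+y| < size is the descending range with clipped endpoints.
theorem filter_abs_pyRange (size x a b : Int) :
    (PySem.List.pyRange a b (-1)).filter (fun y => |x + y| < size) =
    PySem.List.pyRange (min a (size - 1 - x)) (max b (-size - x)) (-1) := by
  by_cases hab : a ≤ b
  · rw [PySem.List.pyRange_neg_one_eq_nil hab,
        PySem.List.pyRange_neg_one_eq_nil (by omega : min a (size - 1 - x) ≤ max b (-size - x))]
    rfl
  · rw [PySem.List.pyRange_neg_one_cons (by omega : b < a)]
    have ih := filter_abs_pyRange size x (a - 1) b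
    by_cases hin : -size < x + a ∧ x + a < size
    · have h1 : a ≤ size - 1 - x := by omega
      have h2 : -size - x < a := by omega
      rw [List.filter_cons_of_pos (by simp only [decide_eq_true_eq, abs_lt]; omega), ih]
      rw [(by omega : min a (size - 1 - x) = a),
          PySem.List.pyRange_neg_one_cons (by omega : max b (-size - x) < a),
          (by omega : min (a - 1) (size - 1 - x) = a - 1)]
    · rw [List.filter_cons_of_neg (by simp only [decide_eq_true_eq, abs_lt]; omega), ih]
      by_cases hhi : size - 1 - x < a
      · rw [(by omega : min (a - 1) (size - 1 - x) = min a (size - 1 - x))]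
      · -- then a ≤ -size - x : both sides are empty ranges
        rw [PySem.List.pyRange_neg_one_eq_nil (by omega),
            PySem.List.pyRange_neg_one_eq_nil (by omega)]
termination_by (a - b).toNat
decreasing_by omega

-- A's inner loop for a fixed x equals B's row for x.
theorem row_eq (size x : Int) :
    (PySem.List.pyRange (size - 1) (-size) (-1)).foldl (fun row y =>
      if |x + y| < size then row ++ [(x, y)] else row) [] =
    (PySem.List.pyRange (min (size - 1) (size - 1 - x)) (max (-size) (-size - x)) (-1)).map
      (fun y => (x, y)) := by
  have h := PySem.List.foldl_append_if (fun y => decide (|x + y| < size))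
    (fun y => ((x, y) : Int × Int)) (PySem.List.pyRange (size - 1) (-size) (-1)) []
  simp only [decide_eq_true_eq] at h
  rw [h, filter_abs_pyRange, List.nil_append]

-- For x in A's outer range the row is nonempty.
theorem row_nonempty (size x : Int) (hx : x ∈ PySem.List.pyRange (size - 1) (-size) (-1)) :
    (PySem.List.pyRange (min (size - 1) (size - 1 - x)) (max (-size) (-size - x)) (-1)).map
      (fun y => (x, y)) ≠ [] := by
  rw [PySem.List.mem_pyRange_neg_one] at hx
  have : max (-size) (-size - x) < min (size - 1) (size - 1 - x) := by omega
  rw [PySem.List.pyRange_neg_one_cons this]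
  simp

-- ===== VERDICT (by name: the statement is the Claim_ definition above) =====
theorem hexagonal_board_generator_orientation3_spec : Claim_equal_hexagonal_board_generator_orientation3 := by
  intro size _
  unfold Spec_hexagonal_board_generator_orientation3
  unfold hexagonal_board_generator_orientation3 hexagonal_board_generator_orientation3_alt
  refine Eq.trans (PySem.List.foldl_congr_mem _ _ (fun hex_rows x => hex_rows ++
      [(PySem.List.pyRange (min (size - 1) (size - 1 - x)) (max (-size) (-size - x)) (-1)).map
        (fun y => (x, y))]) [] ?_) ?_
  · intro acc x hx
    simp only [row_eq]
    rw [if_pos (row_nonempty size x hx)]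
  · rw [PySem.List.foldl_append_singleton_eq_map, List.nil_append]
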